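-- pv_equiv track=rewrite | github.com/omcandido/RL-AA | src/argumentation/utils.py | construct_all_attacks
-- ===== SOURCE A (Python) =====
-- from typing import List, Tuple, MutableSet
--
-- def construct_all_attacks(arg_actions: dict) -> MutableSet[Tuple[str, str]]:
--     """Given a dictionary of arguments and their promoted action, returns a set with all attacks among them.
--
--     Args:
--         arg_actions (dict): dictionary in the format {argument: action}
--
--     Returns:
--         MutableSet[Tuple[str, str]]: set of attacks among
--     """
--     attacks = set()
--     for arg1 in arg_actions:
--         for arg2 in arg_actions:
--             if arg_actions[arg1] != arg_actions[arg2]: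
--                 attacks.add((arg1, arg2))
--                 attacks.add((arg2, arg1))
--     return attacks
-- ===== SOURCE B (Python) =====
-- def construct_all_attacks(arg_actions: dict):
--     """Set of all attacks: both directions of every pair of arguments promoting different actions."""
--     attacks = []
--     rest = list(arg_actions.items())
--     while rest:
--         arg1, act1 = rest.pop(0)
--         for arg2, act2 in rest:
--             if act1 != act2:
--                 attacks.append((arg1, arg2))
--                 attacks.append((arg2, arg1))
--     return set(attacks)
-- ===== Notes on version B (the rewrite author's own statement) =====
-- stated objective: alternative
-- what changed: Replaces the full n-by-n double loop over dict keys with repeated set-membership insertions by a single triangular pass over the remaining items that appends each cross-action pair (in both directions) exactly once to a plain list, with no membership tests and no dict lookups.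
import Mathlib
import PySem

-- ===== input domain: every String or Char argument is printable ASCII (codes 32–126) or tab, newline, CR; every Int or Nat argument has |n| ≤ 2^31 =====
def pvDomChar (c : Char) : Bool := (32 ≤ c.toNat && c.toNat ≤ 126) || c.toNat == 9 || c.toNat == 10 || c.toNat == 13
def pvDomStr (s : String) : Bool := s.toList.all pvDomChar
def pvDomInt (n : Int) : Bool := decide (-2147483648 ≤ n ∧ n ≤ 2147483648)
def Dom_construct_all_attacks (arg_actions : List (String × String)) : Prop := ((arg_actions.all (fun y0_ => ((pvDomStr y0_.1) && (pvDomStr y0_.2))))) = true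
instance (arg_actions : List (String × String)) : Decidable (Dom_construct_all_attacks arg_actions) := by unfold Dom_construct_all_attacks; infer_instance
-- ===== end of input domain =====

-- B replaces A's full n×n key loop with set insertions by one triangular pass over the
-- remaining items that appends each cross-action pair (both directions) exactly once.


-- ===== PORT A =====
-- 'for arg1 in arg_actions' iterates the dict's keys; 'arg_actions[arg1]' is getD with an
-- unreachable default (the key is always present, so Python's KeyError never fires).
def construct_all_attacks (arg_actions : List (String × String)) : List (String × String) :=
  let d := PySem.Dict.ofList arg_actions
  d.keys.foldl (fun attacks arg1 =>
    d.keys.foldl (fun attacks arg2 =>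
      if d.getD arg1 "" ≠ d.getD arg2 "" then
        PySem.Set.add (PySem.Set.add attacks (arg1, arg2)) (arg2, arg1)
      else attacks) attacks) PySem.Set.empty

-- ===== PORT B =====
-- the 'while rest: arg1, act1 = rest.pop(0); for arg2, act2 in rest: …' loop of Source B
def pvAltLoop : List (String × String) → List (String × String) → List (String × String)
  | [], attacks => attacks
  | (arg1, act1) :: rest, attacks =>
      pvAltLoop rest (rest.foldl (fun acc q =>
        if act1 ≠ q.2 then acc ++ [(arg1, q.1), (q.1, arg1)] else acc) attacks)

def construct_all_attacks_alt (arg_actions : List (String × String)) : List (String × String) :=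
  PySem.Set.ofList (pvAltLoop (PySem.Dict.ofList arg_actions).items [])

-- ===== PRECONDITION & SPEC =====
def Spec_construct_all_attacks (arg_actions : List (String × String)) (out : List (String × String)) : Prop := out = construct_all_attacks_alt arg_actions
instance (arg_actions : List (String × String)) (out : List (String × String)) : Decidable (Spec_construct_all_attacks arg_actions out) := by unfold Spec_construct_all_attacks; infer_instance

-- ===== CLAIM (what is proved, stated in full; the proofs are below) =====
def Claim_equal_construct_all_attacks : Prop := ∀ (arg_actions : List (String × String)), Dom_construct_all_attacks arg_actions → Spec_construct_all_attacks arg_actions (construct_all_attacks arg_actions)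

-- ===== LEMMAS AND PROOFS =====

-- the (filtered) row of attacks of argument a (action v) against every item of L, both directions
def pvRow (a v : String) (L : List (String × String)) : List (String × String) :=
  L.flatMap (fun q => if v ≠ q.2 then [(a, q.1), (q.1, a)] else [])

-- triangular pass: each cross-action pair contributes its two directions exactly once
def pvTri : List (String × String) → List (String × String)
  | [] => []
  | p :: rest => pvRow p.1 p.2 rest ++ pvTri rest

-- the square sequence of insertion attempts A makes
def pvSq (L : List (String × String)) : List (String × String) :=
  L.flatMap (fun p => pvRow p.1 p.2 L)

theorem mem_pvRow {x : String × String} {a v : String} {L : List (String × String)} :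
    x ∈ pvRow a v L ↔ ∃ q ∈ L, v ≠ q.2 ∧ (x = (a, q.1) ∨ x = (q.1, a)) := by
  constructor
  · intro h
    simp only [pvRow, List.mem_flatMap] at h
    obtain ⟨q, hq, hx⟩ := h
    by_cases hv : v = q.2
    · simp [hv] at hx
    · simp only [hv, ne_eq, not_false_iff, if_pos, List.mem_cons,
        List.not_mem_nil, or_false] at hx
      exact ⟨q, hq, hv, hx⟩
  · rintro ⟨q, hq, hne, hx⟩
    simp only [pvRow, List.mem_flatMap]
    refine ⟨q, hq, ?_⟩
    simp only [hne, ne_eq, not_false_iff, if_pos, List.mem_cons, List.not_mem_nil, or_false]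
    tauto

theorem mem_pvSq {x : String × String} {L : List (String × String)} (h : x ∈ pvSq L) :
    x.1 ∈ L.map Prod.fst ∧ x.2 ∈ L.map Prod.fst := by
  simp only [pvSq, List.mem_flatMap] at h
  obtain ⟨p, hp, hx⟩ := h
  rw [mem_pvRow] at hx
  obtain ⟨q, hq, -, hx⟩ := hx
  rcases hx with rfl | rfl
  · exact ⟨List.mem_map.mpr ⟨p, hp, rfl⟩, List.mem_map.mpr ⟨q, hq, rfl⟩⟩
  · exact ⟨List.mem_map.mpr ⟨q, hq, rfl⟩, List.mem_map.mpr ⟨p, hp, rfl⟩⟩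

theorem nodup_pvRow {a v : String} {L : List (String × String)}
    (ha : a ∉ L.map Prod.fst) (hL : (L.map Prod.fst).Nodup) :
    (pvRow a v L).Nodup := by
  induction L with
  | nil => simp [pvRow]
  | cons q R ih =>
    simp only [List.map_cons, List.nodup_cons, List.mem_cons, not_or] at ha hL
    have haq : a ≠ q.1 := ha.1
    have haR : a ∉ R.map Prod.fst := ha.2
    have hq1 : q.1 ∉ R.map Prod.fst := hL.1
    have hrec := ih haR hL.2
    have hrow : pvRow a v (q :: R) =
        (if v ≠ q.2 then [(a, q.1), (q.1, a)] else []) ++ pvRow a v R := by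
      simp [pvRow]
    rw [hrow]
    have hdisj : ∀ y ∈ ([(a, q.1), (q.1, a)] : List (String × String)), y ∉ pvRow a v R := by
      intro y hy hmem
      rw [mem_pvRow] at hmem
      obtain ⟨q', hq', -, hx⟩ := hmem
      have hq'1 : q'.1 ∈ R.map Prod.fst := List.mem_map.mpr ⟨q', hq', rfl⟩
      simp only [List.mem_cons, List.not_mem_nil, or_false] at hy
      rcases hy with rfl | rfl <;> rcases hx with h | h <;>
        simp only [Prod.mk.injEq] at h <;> obtain ⟨h1, h2⟩ := h
      · exact hq1 (h2 ▸ hq'1)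
      · exact haR (h1 ▸ hq'1)
      · exact haR (h2 ▸ hq'1)
      · exact hq1 (h1 ▸ hq'1)
    by_cases hc : v = q.2
    · simpa [hc] using hrec
    · rw [if_pos hc]
      refine List.Nodup.append ?_ hrec ?_
      · refine List.nodup_cons.mpr ⟨?_, List.nodup_singleton _⟩
        intro hmem
        rw [List.mem_singleton] at hmem
        exact haq (congrArg Prod.fst hmem)
      · intro y hy; exact fun hz => hdisj y hy hz

theorem update_of_subset (xs : List (String × String)) :
    ∀ s : PySem.Set (String × String), (∀ y ∈ xs, y ∈ s) → PySem.Set.update s xs = s := by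
  induction xs with
  | nil => intro s _; rfl
  | cons x xs ih =>
    intro s h
    rw [PySem.Set.update_cons, PySem.Set.add_of_mem (h x (List.mem_cons_self ..))]
    exact ih s fun y hy => h y (List.mem_cons_of_mem _ hy)

theorem update_flatMap_drop (l : List (String × String))
    (c r : String × String → List (String × String)) :
    ∀ s : PySem.Set (String × String), (∀ q ∈ l, ∀ y ∈ c q, y ∈ s) →
    PySem.Set.update s (l.flatMap (fun q => c q ++ r q)) =
      PySem.Set.update s (l.flatMap r) := by
  induction l with
  | nil => intro s _; rfl
  | cons q rest ih =>
    intro s h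
    rw [List.flatMap_cons, List.flatMap_cons, List.append_assoc,
        PySem.Set.update_append, PySem.Set.update_append, PySem.Set.update_append,
        update_of_subset (c q) s (h q (List.mem_cons_self ..))]
    exact ih (PySem.Set.update s (r q)) fun q' hq' y hy =>
      (PySem.Set.mem_update _ _ _).mpr (Or.inl (h q' (List.mem_cons_of_mem _ hq') y hy))

theorem pvFlatMap_congr {α β : Type} {l : List α} {f g : α → List β}
    (h : ∀ x ∈ l, f x = g x) : l.flatMap f = l.flatMap g := by
  induction l with
  | nil => rfl
  | cons x xs ih =>
    rw [List.flatMap_cons, List.flatMap_cons, h x (List.mem_cons_self ..),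
        ih fun y hy => h y (List.mem_cons_of_mem _ hy)]

theorem ofList_pvSq {L : List (String × String)} (h : (L.map Prod.fst).Nodup) :
    PySem.Set.ofList (pvSq L) = pvTri L := by
  induction L with
  | nil => rfl
  | cons p R ih =>
    simp only [List.map_cons, List.nodup_cons] at h
    obtain ⟨ha, hR⟩ := h
    have hrow0 : pvRow p.1 p.2 (p :: R) = pvRow p.1 p.2 R := by simp [pvRow]
    have hsq : pvSq (p :: R) = pvRow p.1 p.2 R ++
        R.flatMap (fun q => (if q.2 ≠ p.2 then [(q.1, p.1), (p.1, q.1)] else []) ++ pvRow q.1 q.2 R) := by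
      simp only [pvSq, List.flatMap_cons, hrow0]
      congr 1
    have hchunk : ∀ q ∈ R, ∀ y ∈ (if q.2 ≠ p.2 then [(q.1, p.1), (p.1, q.1)] else []),
        y ∈ pvRow p.1 p.2 R := by
      intro q hq y hy
      by_cases hc : q.2 = p.2
      · simp [hc] at hy
      · simp only [hc, ne_eq, not_false_iff, if_pos, List.mem_cons,
          List.not_mem_nil, or_false] at hy
        rw [mem_pvRow]
        refine ⟨q, hq, fun he => hc he.symm, ?_⟩
        tauto
    rw [hsq, PySem.Set.ofList_append,
        PySem.Set.ofList_eq_self_of_nodup _ (nodup_pvRow ha hR),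
        update_flatMap_drop R _ _ (pvRow p.1 p.2 R) hchunk]
    have hps : R.flatMap (fun q => pvRow q.1 q.2 R) = pvSq R := rfl
    rw [hps, PySem.Set.update_eq_append_filter, ih hR]
    have hfilt : ∀ y ∈ pvTri R,
        (!(PySem.Set.contains (pvRow p.1 p.2 R) y)) = true := by
      intro y hy
      rw [← ih hR] at hy
      simp only [PySem.Set.mem_ofList] at hy
      have hy' := mem_pvSq hy
      have hnot : y ∉ pvRow p.1 p.2 R := by
        intro hcm
        rw [mem_pvRow] at hcm
        obtain ⟨q', hq', -, hx⟩ := hcm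
        rcases hx with rfl | rfl
        · exact ha hy'.1
        · exact ha hy'.2
      cases hcb : PySem.Set.contains (pvRow p.1 p.2 R) y with
      | false => rfl
      | true =>
        simp only [PySem.Set.contains_iff] at hcb
        exact absurd hcb hnot
    rw [List.filter_eq_self.mpr hfilt]
    rfl

-- Source B's inner 'for arg2, act2 in rest' loop appends exactly the row of arg1
theorem foldl_if_append (a1 act1 : String) (l : List (String × String)) :
    ∀ acc : List (String × String),
      l.foldl (fun acc q => if act1 ≠ q.2 then acc ++ [(a1, q.1), (q.1, a1)] else acc) acc =
        acc ++ pvRow a1 act1 l := by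
  induction l with
  | nil => intro acc; simp [pvRow]
  | cons q rest ih =>
    intro acc
    rw [List.foldl_cons, ih]
    by_cases hc : act1 = q.2
    · simp [pvRow, hc]
    · simp [pvRow, hc]

theorem pvAltLoop_eq (l : List (String × String)) :
    ∀ acc, pvAltLoop l acc = acc ++ pvTri l := by
  induction l with
  | nil => intro acc; simp [pvAltLoop, pvTri]
  | cons p rest ih =>
    intro acc
    obtain ⟨a1, act1⟩ := p
    rw [pvAltLoop, ih, foldl_if_append, List.append_assoc]
    rfl

-- A's inner key loop from state s is one Set.update by the flattened row
theorem inner_fold (d : PySem.Dict String String) (arg1 : String) (K : List String) :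
    ∀ s : PySem.Set (String × String),
      K.foldl (fun attacks arg2 =>
        if d.getD arg1 "" ≠ d.getD arg2 "" then
          PySem.Set.add (PySem.Set.add attacks (arg1, arg2)) (arg2, arg1)
        else attacks) s =
      PySem.Set.update s (K.flatMap (fun arg2 =>
        if d.getD arg1 "" ≠ d.getD arg2 "" then [(arg1, arg2), (arg2, arg1)] else [])) := by
  induction K with
  | nil => intro s; rfl
  | cons k K ih =>
    intro s
    rw [List.foldl_cons, List.flatMap_cons, PySem.Set.update_append, ih]
    congr 1
    split <;> rfl

-- A's whole double loop is one Set.update by the flattened square sequence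
theorem outer_fold (d : PySem.Dict String String) (K Kin : List String) :
    ∀ s : PySem.Set (String × String),
      K.foldl (fun attacks arg1 =>
        Kin.foldl (fun attacks arg2 =>
          if d.getD arg1 "" ≠ d.getD arg2 "" then
            PySem.Set.add (PySem.Set.add attacks (arg1, arg2)) (arg2, arg1)
          else attacks) attacks) s =
      PySem.Set.update s (K.flatMap (fun arg1 => Kin.flatMap (fun arg2 =>
        if d.getD arg1 "" ≠ d.getD arg2 "" then [(arg1, arg2), (arg2, arg1)] else []))) := by
  induction K with
  | nil => intro s; rfl
  | cons k K ih =>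
    intro s
    rw [List.foldl_cons, inner_fold, ih, List.flatMap_cons, PySem.Set.update_append]

-- ===== VERDICT (by name: the statement is the Claim_ definition above) =====
theorem construct_all_attacks_spec : Claim_equal_construct_all_attacks := by
  intro xs _
  show construct_all_attacks xs = construct_all_attacks_alt xs
  simp only [construct_all_attacks, construct_all_attacks_alt]
  have hnd : (PySem.Dict.ofList xs).keys.Nodup := PySem.Dict.nodup_keys_ofList xs
  set d := PySem.Dict.ofList xs with hd
  rw [outer_fold d d.keys d.keys PySem.Set.empty]
  rw [show ∀ L : List (String × String),
        PySem.Set.update PySem.Set.empty L = PySem.Set.ofList L from fun L => rfl]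
  have hk : d.keys = d.items.map Prod.fst := rfl
  have hndi : (d.items.map Prod.fst).Nodup := hk ▸ hnd
  have hseq : d.keys.flatMap (fun arg1 => d.keys.flatMap (fun arg2 =>
      if d.getD arg1 "" ≠ d.getD arg2 "" then [(arg1, arg2), (arg2, arg1)] else [])) =
      pvSq d.items := by
    rw [hk, List.flatMap_map]
    refine pvFlatMap_congr fun p hp => ?_
    rw [List.flatMap_map]
    have hp' : (p.1, p.2) ∈ d.items := by rw [Prod.mk.eta]; exact hp
    have hgp : d.getD p.1 "" = p.2 := PySem.Dict.getD_of_mem_items d hp' hnd ""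
    refine Eq.trans (pvFlatMap_congr fun q hq => ?_) rfl
    have hq' : (q.1, q.2) ∈ d.items := by rw [Prod.mk.eta]; exact hq
    have hgq : d.getD q.1 "" = q.2 := PySem.Dict.getD_of_mem_items d hq' hnd ""
    simp only [hgp, hgq]
  rw [hseq, ofList_pvSq hndi, pvAltLoop_eq, List.nil_append, ← ofList_pvSq hndi,
      PySem.Set.ofList_ofList]
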